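-- pv_equiv track=rewrite | github.com/FabrizioMontanari/python-stdnum | stdnum/it/aic.py | from_base32
-- ===== SOURCE A (Python) =====
-- AIC_TABLE = '0123456789BCDFGHJKLMNPQRSTUVWXYZ'
--
-- def from_base32(string):
--     """Convert a base32 representation of an AIC to a base10 one.
--     Parameters
--     ----------
--     string : str
--         The string containing the base32 AIC
--     Returns
--     -------
--     str
--         The converted string. Returns None if it fails.
--     """
--     # reverse string
--     string = string[::-1]
--     tot = 0
--     try:
--         for idx, x in enumerate(string):
--             tot = tot + AIC_TABLE.index(x.upper()) * 32 ** idx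
--     except ValueError:
--         raise InvalidFormat()
--     return str(tot).zfill(9)
-- ===== SOURCE B (Python) =====
-- AIC_TABLE = '0123456789BCDFGHJKLMNPQRSTUVWXYZ'
-- AIC_MAP = {x: i for i, x in enumerate(AIC_TABLE)}
--
-- def from_base32(string):
--     """Convert a base32 representation of an AIC to a base10 one.
--
--     Two staged passes: first translate every character to its digit value
--     through a precomputed dict, then accumulate with Horner's rule."""
--     digits = [AIC_MAP.get(x.upper()) for x in string]
--     if None in digits:
--         raise InvalidFormat()
--     tot = 0
--     for d in digits:
--         tot = 32 * tot + d
--     return str(tot).zfill(9)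
-- ===== Notes on version B (the rewrite author's own statement) =====
-- stated objective: faster
-- what changed: Replaces the reverse-the-string loop summing AIC_TABLE.index(x)*32**idx by two staged passes: a precomputed char->digit dict maps the string to a digit list (no linear table scan, no reversal), then a Horner accumulation tot = 32*tot + d folds the digits (no growing 32**idx powers).
import Mathlib
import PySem

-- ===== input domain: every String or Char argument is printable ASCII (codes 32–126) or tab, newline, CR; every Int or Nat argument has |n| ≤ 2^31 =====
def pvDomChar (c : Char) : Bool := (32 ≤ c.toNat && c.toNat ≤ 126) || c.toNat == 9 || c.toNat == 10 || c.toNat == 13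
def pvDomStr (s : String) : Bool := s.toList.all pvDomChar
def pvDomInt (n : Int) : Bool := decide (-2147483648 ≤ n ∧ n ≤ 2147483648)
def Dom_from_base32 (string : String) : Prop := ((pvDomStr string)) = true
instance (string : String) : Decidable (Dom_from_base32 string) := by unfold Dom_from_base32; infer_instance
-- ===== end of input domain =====

-- B replaces A's reverse-then-sum-of-digit*32^idx loop by two staged passes: a precomputed
-- char->digit dict translating the string, then a Horner fold (measured faster: no powers, no table scan).

def pvAicTable : List Char := "0123456789BCDFGHJKLMNPQRSTUVWXYZ".toList

-- ===== PORT A =====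
-- A: reverse the string, then for each (idx, x) add AIC_TABLE.index(x.upper()) * 32 ** idx.
-- 'none' models the raised InvalidFormat (ValueError on .index); those inputs are outside Pre_.
def pvALoop : List Char → Nat → Int → Option Int
  | [], _, tot => some tot
  | x :: rest, idx, tot =>
    match PySem.List.index? pvAicTable (PySem.Chars.upperChar x) with
    | none => none
    | some i => pvALoop rest (idx + 1) (tot + (i : Int) * 32 ^ idx)

def from_base32 (string : String) : String :=
  match PySem.Str.slice? string none none (-1) with
  | none => ""
  | some rev =>
    match pvALoop rev.toList 0 0 with
    | none => ""  -- A raises InvalidFormat here; excluded by Pre_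
    | some tot => PySem.Str.zfill (PySem.Int.toStr tot) 9

-- ===== PORT B =====
-- B: AIC_MAP = {x: i for i, x in enumerate(AIC_TABLE)}, built once.
def pvAicMap : PySem.Dict Char Int :=
  (PySem.List.enumerate pvAicTable).foldl (fun d p => d.insert p.2 p.1) PySem.Dict.empty

-- B: stage 1 maps every character through the dict (None = missing key), stage 2 checks for
-- None (the raised InvalidFormat; excluded by Pre_), stage 3 is the Horner fold over the digits.
-- The '.getD 0' extracts the Int from the Option; it is only reached when no element is none.
def from_base32_alt (string : String) : String :=
  let digits := string.toList.map (fun x => pvAicMap.get? (PySem.Chars.upperChar x))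
  if digits.contains none then ""  -- B raises InvalidFormat here; excluded by Pre_
  else PySem.Str.zfill (PySem.Int.toStr (digits.foldl (fun tot d => 32 * tot + d.getD 0) 0)) 9

-- ===== PRECONDITION & SPEC =====
-- Pre_ excludes exactly the inputs with a character whose uppercase is not in AIC_TABLE,
-- on which both A and B raise InvalidFormat (no value is returned).
def Pre_from_base32 (string : String) : Prop :=
  (string.toList.all (fun c => pvAicTable.contains (PySem.Chars.upperChar c))) = true
instance (string : String) : Decidable (Pre_from_base32 string) := by
  unfold Pre_from_base32; infer_instance

def pvWitness_from_base32 : String := "009CVD"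

def Spec_from_base32 (string : String) (out : String) : Prop := out = from_base32_alt string
instance (string : String) (out : String) : Decidable (Spec_from_base32 string out) := by unfold Spec_from_base32; infer_instance

-- ===== CLAIM (what is proved, stated in full; the proofs are below) =====
def Claim_equal_from_base32 : Prop := ∀ (string : String), Dom_from_base32 string → Pre_from_base32 string → Spec_from_base32 string (from_base32 string)

-- ===== LEMMAS AND PROOFS =====

-- digit value of a character (meaningful when its uppercase is in the table)
def pvD (c : Char) : Int := (pvAicTable.idxOf (PySem.Chars.upperChar c) : Int)

-- little-endian value of a digit list
def pvRval : List Char → Int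
  | [] => 0
  | c :: cs => pvD c + 32 * pvRval cs

theorem pv_idxOf?_of_mem (v : Char) (l : List Char) (h : v ∈ l) :
    l.idxOf? v = some (l.idxOf v) := by
  induction l with
  | nil => simp at h
  | cons x xs ih =>
    by_cases hx : x = v
    · subst hx; simp [List.idxOf?_cons]
    · rcases List.mem_cons.mp h with h' | h'
      · exact absurd h'.symm hx
      · simp [List.idxOf?_cons, hx, ih h']

theorem pv_index?_eq (c : Char) (h : PySem.Chars.upperChar c ∈ pvAicTable) :
    PySem.List.index? pvAicTable (PySem.Chars.upperChar c) =
      some (pvAicTable.idxOf (PySem.Chars.upperChar c)) := by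
  rw [PySem.List.index?_eq_idxOf?, pv_idxOf?_of_mem _ _ h]

theorem pvALoop_eq (l : List Char) (idx : Nat) (tot : Int)
    (h : ∀ c ∈ l, PySem.Chars.upperChar c ∈ pvAicTable) :
    pvALoop l idx tot = some (tot + 32 ^ idx * pvRval l) := by
  induction l generalizing idx tot with
  | nil => simp [pvALoop, pvRval]
  | cons c cs ih =>
    have hc := h c (by simp)
    rw [pvALoop, pv_index?_eq c hc]
    simp only []
    rw [ih _ _ (fun x hx => h x (by simp [hx]))]
    simp only [pvRval, pvD, Option.some.injEq]
    ring

-- the fold-built dict: fresh distinct keys, so its items are the (char, index) pairs in order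
theorem pv_items : pvAicMap.items
    = (PySem.List.enumerate pvAicTable).map (fun p => (p.2, p.1)) := by
  have h := PySem.Dict.items_foldl_insert_fresh (PySem.List.enumerate pvAicTable)
      (fun p => p.2) (fun p => p.1) PySem.Dict.empty
      (fun a _ => PySem.Dict.contains_empty _)
      (by rw [PySem.List.map_snd_enumerate]; decide)
  simpa [pvAicMap] using h

theorem pv_keys : pvAicMap.keys = pvAicTable := by
  show pvAicMap.items.map (fun p => p.1) = pvAicTable
  rw [pv_items, List.map_map]
  exact PySem.List.map_snd_enumerate pvAicTable 0

-- lookups in the precomputed dict: on table members it is the index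
theorem pv_map_get_mem (c : Char) (hc : c ∈ pvAicTable) :
    pvAicMap.get? c = some ((pvAicTable.idxOf c : Int)) := by
  have hlt : pvAicTable.idxOf c < pvAicTable.length := List.idxOf_lt_length_of_mem hc
  have hmem : (c, (pvAicTable.idxOf c : Int)) ∈ pvAicMap.items := by
    rw [pv_items]
    refine List.mem_map.mpr ⟨((pvAicTable.idxOf c : Int), c), ?_, rfl⟩
    exact (PySem.List.mem_enumerate_iff pvAicTable 0 _).mpr
      ⟨pvAicTable.idxOf c, hlt, by simp [List.getElem_idxOf]⟩
  exact PySem.Dict.get?_of_mem_items pvAicMap hmem (by rw [pv_keys]; decide)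

theorem pvRval_append_singleton (l : List Char) (c : Char) :
    pvRval (l ++ [c]) = pvRval l + pvD c * 32 ^ l.length := by
  induction l with
  | nil => simp [pvRval]
  | cons x xs ih => simp [pvRval, ih]; ring

theorem pv_horner_eq_rval_reverse (l : List Char) (tot : Int) :
    l.foldl (fun a c => 32 * a + pvD c) tot = tot * 32 ^ l.length + pvRval l.reverse := by
  induction l generalizing tot with
  | nil => simp [pvRval]
  | cons c cs ih =>
    simp only [List.foldl_cons, ih, List.reverse_cons, pvRval_append_singleton,
      List.length_reverse, List.length_cons]
    ring

theorem from_base32_spec : Claim_equal_from_base32 := by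
  intro s _ hpre0
  have hpre : ∀ c ∈ s.toList, PySem.Chars.upperChar c ∈ pvAicTable := by
    simpa [Pre_from_base32, List.all_eq_true] using hpre0
  unfold Spec_from_base32 from_base32 from_base32_alt
  rw [PySem.Str.slice?_none_none_neg_one]
  simp only []
  -- B's digit list is pointwise 'some (pvD c)'
  have hdig : s.toList.map (fun x => pvAicMap.get? (PySem.Chars.upperChar x))
      = s.toList.map (fun x => some (pvD x)) := by
    apply List.map_congr_left
    intro c hc
    rw [pv_map_get_mem _ (hpre c hc)]; rfl
  rw [hdig]
  have hcont : (s.toList.map (fun x => some (pvD x))).contains (none : Option Int) = false := by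
    simp [List.contains_eq_mem]
  rw [hcont]
  simp only [Bool.false_eq_true, if_false, List.foldl_map]
  rw [show (String.ofList s.toList.reverse).toList = s.toList.reverse from by simp]
  rw [pvALoop_eq _ _ _ (fun c hc => hpre c (List.mem_reverse.mp hc))]
  have : (fun (tot : Int) (c : Char) => 32 * tot + (some (pvD c)).getD 0)
      = fun a c => 32 * a + pvD c := by rfl
  rw [this, pv_horner_eq_rval_reverse]
  simp
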